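-- pv_equiv track=rewrite | github.com/leewonjun67/Algorithm | 알고리즘 스터디/8주차 문제풀이/실습/문제풀이 4.py | solution
-- ===== SOURCE A (Python) =====
-- def solution(nums):
--     choose = []
--     limit = len(nums) // 2
--
--     for i in nums:
--         if i not in choose:
--             choose.append(i)
--         if len(choose) == limit:
--             break
--
--     return len(choose)
-- ===== SOURCE B (Python) =====
-- def solution(nums):
--     s = sorted(nums)
--     distinct = 0 if not s else 1 + sum(1 for a, b in zip(s, s[1:]) if a != b)
--     return min(distinct, len(nums) // 2)
-- ===== Notes on version B (the rewrite author's own statement) =====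
-- stated objective: faster
-- what changed: Replaces the incremental membership-test dedup loop (linear scan of the accumulator per element, with early break) by sorting a copy and counting adjacent inequalities in one scan, capping with min(distinct, len(nums)//2).
-- intended difference: On singleton lists the cap n//2 is 0 but A's break condition never fires, so A returns 1; B returns min(1,0)=0, the intended value of a distinct count capped at n//2. — e.g. on solution([1]): A returns 1, B returns 0
import Mathlib
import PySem

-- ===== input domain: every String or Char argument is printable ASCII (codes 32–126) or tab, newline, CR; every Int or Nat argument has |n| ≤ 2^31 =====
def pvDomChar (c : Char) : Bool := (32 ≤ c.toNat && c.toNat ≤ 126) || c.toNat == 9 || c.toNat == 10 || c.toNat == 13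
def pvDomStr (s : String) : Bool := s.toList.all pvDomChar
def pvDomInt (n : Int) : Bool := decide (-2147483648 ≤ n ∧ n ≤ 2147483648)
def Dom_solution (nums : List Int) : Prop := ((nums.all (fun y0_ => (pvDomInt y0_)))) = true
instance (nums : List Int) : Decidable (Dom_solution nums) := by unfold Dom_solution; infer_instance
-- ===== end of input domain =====

-- B replaces A's incremental membership-dedup loop (with early break at n//2) by a
-- sort-then-adjacent-scan distinct count capped with min (measured faster); on singleton
-- lists B returns the intended capped value 0 where A returns 1 (stated as D_ below).

-- ===== PORT A =====
-- the for-loop of A with its early break; state is the accumulated `choose` list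
def solA_loop : List Int → List Int → Int → List Int
  | [], choose, _ => choose
  | i :: rest, choose, limit =>
    let c := if choose.contains i then choose else choose ++ [i]
    if (c.length : Int) = limit then c else solA_loop rest c limit

def solution (nums : List Int) : Int :=
  ((solA_loop nums [] (PySem.Int.floordiv (nums.length : Int) 2)).length : Int)

-- ===== PORT B =====
def solution_alt (nums : List Int) : Int :=
  let s := PySem.List.sorted nums (fun x => x) false
  let distinct : Int :=
    if s = [] then 0
    else 1 + (s.zip s.tail).foldl (fun acc p => if p.1 ≠ p.2 then acc + 1 else acc) 0
  min distinct (PySem.Int.floordiv (nums.length : Int) 2)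

-- ===== PRECONDITION & SPEC =====
-- On singleton lists the cap n//2 is 0 but A's break condition never fires, so A returns 1;
-- B returns min(1,0)=0, the intended value of a distinct count capped at n//2.
def D_solution (nums : List Int) : Prop := nums.length = 1
instance (nums : List Int) : Decidable (D_solution nums) := by unfold D_solution; infer_instance

def Spec_solution (nums : List Int) (out : Int) : Prop := ¬ D_solution nums → out = solution_alt nums
instance (nums : List Int) (out : Int) : Decidable (Spec_solution nums out) := by unfold Spec_solution; infer_instance

def pvDiffWitness_solution : List Int := [1]
def pvDiffWitnessOut_solution : Int × Int := (1, 0)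

-- ===== CLAIM (what is proved, stated in full; the proofs are below) =====
def Claim_unchanged_solution : Prop := ∀ (nums : List Int), Dom_solution nums → Spec_solution nums (solution nums)
def Claim_changed_solution : Prop := Dom_solution (pvDiffWitness_solution) ∧ D_solution (pvDiffWitness_solution) ∧ solution (pvDiffWitness_solution) = pvDiffWitnessOut_solution.1 ∧ solution_alt (pvDiffWitness_solution) = pvDiffWitnessOut_solution.2 ∧ pvDiffWitnessOut_solution.1 ≠ pvDiffWitnessOut_solution.2
def Claim_exact_solution : Prop := ∀ (nums : List Int), Dom_solution nums → D_solution nums → solution nums ≠ solution_alt nums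

-- ===== LEMMAS AND PROOFS =====

-- the dedup fold A performs when the break never fires
def ffold (nums choose : List Int) : List Int :=
  nums.foldl (fun acc i => if acc.contains i then acc else acc ++ [i]) choose

theorem ffold_cons (i : Int) (rest choose : List Int) :
    ffold (i :: rest) choose = if i ∈ choose then ffold rest choose else ffold rest (choose ++ [i]) := by
  by_cases h : i ∈ choose <;> simp [ffold, h]

theorem ffold_len_ge (nums choose : List Int) : choose.length ≤ (ffold nums choose).length := by
  induction nums generalizing choose with
  | nil => simp [ffold]
  | cons i rest ih =>
    rw [ffold_cons]
    by_cases h : i ∈ choose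
    · simpa [h] using ih choose
    · have := ih (choose ++ [i])
      simp [h]
      simp at this
      omega

theorem ffold_card (nums : List Int) : ∀ choose : List Int, choose.Nodup →
    (ffold nums choose).length = (choose.toFinset ∪ nums.toFinset).card := by
  induction nums with
  | nil => intro choose h; simp [ffold, List.toFinset_card_of_nodup h]
  | cons i rest ih =>
    intro choose h
    rw [ffold_cons]
    by_cases hc : i ∈ choose
    · rw [if_pos hc, ih choose h]
      congr 1
      ext x
      simp only [List.toFinset_cons, Finset.mem_union, Finset.mem_insert, List.mem_toFinset]
      constructor
      · rintro (h1 | h2) <;> [exact Or.inl h1; exact Or.inr (Or.inr h2)]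
      · rintro (h1 | h2 | h3)
        · exact Or.inl h1
        · exact Or.inl (by simpa [h2] using hc)
        · exact Or.inr h3
    · have hnd : (choose ++ [i]).Nodup := by
        simp [List.nodup_append, h]
        exact fun a ha hai => hc (hai ▸ ha)
      rw [if_neg hc, ih (choose ++ [i]) hnd]
      congr 1
      ext x
      simp [List.toFinset_append]

-- A's loop with a positive cap L returns min(distinct count, L) elements
theorem loopA_len (nums : List Int) : ∀ (choose : List Int) (L : Nat), 1 ≤ L → choose.length < L →
    (solA_loop nums choose (L : Int)).length = min (ffold nums choose).length L := by
  induction nums with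
  | nil =>
    intro choose L _ h2
    simp [solA_loop, ffold]
    omega
  | cons i rest ih =>
    intro choose L h1 h2
    simp only [solA_loop]
    set c := if choose.contains i then choose else choose ++ [i] with hcdef
    have hff : ffold (i :: rest) choose = ffold rest c := by
      simp only [ffold, List.foldl_cons, hcdef]
    have hclen : c.length ≤ choose.length + 1 := by
      rw [hcdef]
      by_cases hm : i ∈ choose <;> simp [hm]
    by_cases hb : (c.length : Int) = (L : Int)
    · have hl : c.length = L := by exact_mod_cast hb
      have hge := ffold_len_ge rest c
      rw [if_pos hb, hff]
      omega
    · have hlt : c.length < L := by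
        have : c.length ≠ L := by exact_mod_cast hb
        omega
      rw [if_neg hb, hff, ih c L h1 hlt]

-- B's adjacent-scan fold is a countP
theorem foldl_adj_count (l : List (Int × Int)) (a : Int) :
    l.foldl (fun acc p => if p.1 ≠ p.2 then acc + 1 else acc) a
      = a + (l.countP (fun p => decide (p.1 ≠ p.2)) : Int) := by
  induction l generalizing a with
  | nil => simp
  | cons p t ih =>
    rw [List.foldl_cons]
    by_cases h : p.1 = p.2
    · show List.foldl _ (if p.1 ≠ p.2 then a + 1 else a) t = _
      rw [if_neg (by simp [h]), ih]
      simp [h]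
    · show List.foldl _ (if p.1 ≠ p.2 then a + 1 else a) t = _
      rw [if_pos h, ih]
      simp [h]
      ring

-- on a weakly increasing list, 1 + number of adjacent inequalities = number of distinct values
theorem adj_card (s : List Int) (hs : s.Pairwise (· ≤ ·)) (hne : s ≠ []) :
    1 + (s.zip s.tail).countP (fun p => decide (p.1 ≠ p.2)) = s.toFinset.card := by
  induction s with
  | nil => exact absurd rfl hne
  | cons a t ih =>
    match t, hs with
    | [], _ => simp
    | b :: u, hs =>
      have hpa := List.pairwise_cons.mp hs
      have htp : (b :: u).Pairwise (· ≤ ·) := hpa.2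
      have hle : ∀ x ∈ b :: u, a ≤ x := hpa.1
      have ihr := ih htp (by simp)
      simp only [List.tail_cons, List.zip_cons_cons, List.countP_cons]
      by_cases hab : a = b
      · have heq : (a :: b :: u).toFinset = (b :: u).toFinset := by
          subst hab; simp
        rw [heq, ← ihr]
        simp [hab]
      · have hnm : a ∉ b :: u := by
          intro hm
          rcases List.mem_cons.mp hm with h | h
          · exact hab h
          · have h1 : a ≤ b := hle b (by simp)
            have h2 : b ≤ a := (List.pairwise_cons.mp htp).1 a h
            exact hab (le_antisymm h1 h2)
        have hni : a ∉ insert b u.toFinset := by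
          simp only [Finset.mem_insert, List.mem_toFinset]
          simp only [List.mem_cons, not_or] at hnm
          tauto
        have hcard : (a :: b :: u).toFinset.card = (b :: u).toFinset.card + 1 := by
          simp only [List.toFinset_cons]
          rw [Finset.card_insert_of_notMem hni]
        rw [hcard, ← ihr]
        simp [hab]
        omega

-- floor division of a Nat cast by 2 is Nat division
theorem floordiv_natCast_two (n : Nat) :
    PySem.Int.floordiv (n : Int) 2 = ((n / 2 : Nat) : Int) := by
  rw [PySem.Int.floordiv_eq_ediv_of_pos (by norm_num)]
  omega

theorem distinct_eq (nums : List Int) :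
    (ffold nums []).length = nums.toFinset.card := by
  simpa using ffold_card nums [] List.nodup_nil

theorem sorted_toFinset (nums : List Int) :
    (PySem.List.sorted nums (fun x => x) false).toFinset = nums.toFinset := by
  ext x
  simp [PySem.List.mem_sorted]

-- ===== VERDICT (by name: the statements are the Claim_ definitions above) =====
theorem solution_spec : Claim_unchanged_solution := by
  intro nums _ hD
  show solution nums = solution_alt nums
  unfold solution solution_alt
  rw [floordiv_natCast_two]
  set s := PySem.List.sorted nums (fun x => x) false with hsdef
  have hsp : s.Pairwise (· ≤ ·) := by
    simpa using PySem.List.sorted_pairwise nums (fun x => x)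
  have hlen : s.length = nums.length :=
    (PySem.List.sorted_perm nums (fun x => x) false).length_eq
  set L := nums.length / 2 with hL
  have hD1 : nums.length ≠ 1 := hD
  by_cases hL0 : L = 0
  · -- limit = 0: since length ≠ 1, nums is empty
    have hn0 : nums.length = 0 := by omega
    match nums, hn0 with
    | [], _ =>
      have : s = [] := by rw [hsdef]; rfl
      simp [solA_loop, hL0, this]
  · have h1 : 1 ≤ L := by omega
    have hA := loopA_len nums [] L h1 (by simpa using h1)
    have hsne : s ≠ [] := by
      intro h; rw [h] at hlen; simp at hlen; omega
    rw [hA, distinct_eq]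
    simp only [if_neg hsne, foldl_adj_count]
    have hadj := adj_card s hsp hsne
    rw [sorted_toFinset] at hadj
    push_cast
    omega

theorem solution_changed : Claim_changed_solution := by
  unfold Claim_changed_solution; decide

theorem solution_tight : Claim_exact_solution := by
  intro nums _ hD
  match nums, hD with
  | [a], _ =>
    have hs : PySem.List.sorted [a] (fun x : Int => x) false = [a] :=
      PySem.List.sorted_eq_self_of_pairwise [a] (fun x => x) (List.pairwise_singleton _ _)
    simp [solution, solution_alt, solA_loop, hs, PySem.Int.floordiv]
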